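-- pv_equiv track=rewrite | github.com/sticky-ai/Algorithms | categories/data_structures/arrays/sorting_searching/champernowneDigit.py | champernowneDigit
-- ===== SOURCE A (Python) =====
-- def champernowneDigit(n):
--     s = ''
--     i = 1
--     while True:
--         s += str(i)
--         i += 1
--         if len(s) > n+1:
--             break
--     return int(s[n-1])
-- ===== SOURCE B (Python) =====
-- def champernowneDigit(n):
--     # digit-counting: find the digit-length block containing position n-1,
--     # then the number and the offset inside it, all arithmetically
--     pos = n - 1
--     digits = 1
--     count = 9
--     while pos >= digits * count:
--         pos -= digits * count
--         digits += 1
--         count *= 10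
--     number = 10 ** (digits - 1) + pos // digits
--     return int(str(number)[pos % digits])
-- ===== Notes on version B (the rewrite author's own statement) =====
-- stated objective: faster
-- what changed: A materialises the Champernowne string '123456789101112...' by repeated string concatenation until it covers position n and then indexes into it; B never builds the string: it subtracts whole equal-digit-length blocks arithmetically to locate the block, the number and the digit offset, and extracts one digit of one number.
-- outside the precondition, e.g. on champernowneDigit(0): A returns 2, B returns 0; on champernowneDigit(-1): A raises IndexError, B raises ValueError
import Mathlib
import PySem

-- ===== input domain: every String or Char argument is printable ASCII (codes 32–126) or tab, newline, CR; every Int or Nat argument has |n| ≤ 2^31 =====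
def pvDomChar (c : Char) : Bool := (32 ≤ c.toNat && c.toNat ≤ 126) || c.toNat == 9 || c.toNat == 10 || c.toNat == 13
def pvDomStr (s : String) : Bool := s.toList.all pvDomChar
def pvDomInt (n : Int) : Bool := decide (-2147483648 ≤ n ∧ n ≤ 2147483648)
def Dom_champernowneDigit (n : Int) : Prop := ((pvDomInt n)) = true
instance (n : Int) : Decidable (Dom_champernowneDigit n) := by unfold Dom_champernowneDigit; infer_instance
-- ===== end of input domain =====

-- B replaces A's "build the Champernowne string by repeated concatenation until it is long
-- enough" with digit-block arithmetic (objective: faster — B loops once per digit LENGTH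
-- instead of once per number).

-- ===== PORT A =====

-- two facts about Nat.toDigitsCore, needed (only) for the loop's termination measure:
-- one unfolding step, and "the accumulator is appended"
theorem pvCoreUnfold (f n : Nat) (l : List Char) :
    Nat.toDigitsCore 10 (f + 1) n l =
      if n / 10 = 0 then (n % 10).digitChar :: l
      else Nat.toDigitsCore 10 f (n / 10) ((n % 10).digitChar :: l) := by
  simp only [Nat.toDigitsCore]

theorem pvCoreAppend (b : Nat) : ∀ (f n : Nat) (l : List Char),
    Nat.toDigitsCore b f n l = Nat.toDigitsCore b f n [] ++ l := by
  intro f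
  induction f with
  | zero => intro n l; simp [Nat.toDigitsCore]
  | succ f ih =>
    intro n l
    simp only [Nat.toDigitsCore]
    split
    · simp
    · rw [ih (n / b) (Nat.digitChar (n % b) :: l), ih (n / b) [Nat.digitChar (n % b)]]
      simp

-- str(i) is never the empty string
theorem pvToCharsNeNil (i : Int) : PySem.Int.toChars i ≠ [] := by
  unfold PySem.Int.toChars
  split
  · simp
  · show Nat.toDigitsCore 10 (_ + 1) _ [] ≠ []
    rw [pvCoreUnfold]
    split
    · simp
    · rw [pvCoreAppend]; simp

-- the 'while True: s += str(i); i += 1; if len(s) > n+1: break' loop of A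
def champLoop (n : Int) (s : List Char) (i : Int) : List Char :=
  if (n + 1 : Int) < (s ++ PySem.Int.toChars i).length then s ++ PySem.Int.toChars i
  else champLoop n (s ++ PySem.Int.toChars i) (i + 1)
termination_by (n + 2 - s.length).toNat
decreasing_by
  have h2 : 0 < (PySem.Int.toChars i).length :=
    List.length_pos_of_ne_nil (pvToCharsNeNil i)
  simp only [List.length_append, not_lt] at *
  omega

def champernowneDigit (n : Int) : Int :=
  let s := champLoop n [] 1
  match PySem.List.pyGet? s (n - 1) with   -- s[n-1]; none = IndexError, excluded by Pre_
  | some c => (PySem.Int.ofChars? [c]).getD 0   -- int(·); under Pre_ the char is a digit, never none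
  | none => 0

-- ===== PORT B =====

-- the 'while pos >= digits * count: …' loop of Source B; returns the final (pos, digits).
-- The extra '0 < digits * count' conjunct is a pure totality guard: every call reachable
-- from the initial (digits, count) = (1, 9) has digits * count > 0, so behaviour is unchanged.
def blockLoop (pos digits count : Int) : Int × Int :=
  if h : digits * count ≤ pos ∧ 0 < digits * count then
    blockLoop (pos - digits * count) (digits + 1) (count * 10)
  else (pos, digits)
termination_by pos.toNat
decreasing_by omega

def champernowneDigit_alt (n : Int) : Int :=
  let pd := blockLoop (n - 1) 1 9
  -- 10 ** (digits - 1): the loop keeps digits ≥ 1, so the exponent is a Nat; exact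
  let number : Int := 10 ^ (pd.2 - 1).toNat + PySem.Int.floordiv pd.1 pd.2
  match PySem.List.pyGet? (PySem.Int.toChars number) (PySem.Int.mod pd.1 pd.2) with
  | some c => (PySem.Int.ofChars? [c]).getD 0   -- int(str(number)[pos % digits])
  | none => 0

-- ===== PRECONDITION & SPEC =====
-- Pre_ excludes n ≤ 0: for n ≤ -1 A raises IndexError, and at n = 0 (an out-of-range position
-- of this 1-indexed sequence) A's value 2 is only Python's negative-index wraparound s[-1] —
-- as accidental a choice as any other on that corner.
def Pre_champernowneDigit (n : Int) : Prop := 1 ≤ n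
instance (n : Int) : Decidable (Pre_champernowneDigit n) := by unfold Pre_champernowneDigit; infer_instance
def pvWitness_champernowneDigit : Int := 13

def Spec_champernowneDigit (n : Int) (out : Int) : Prop := out = champernowneDigit_alt n
instance (n : Int) (out : Int) : Decidable (Spec_champernowneDigit n out) := by unfold Spec_champernowneDigit; infer_instance

-- ===== CLAIM (what is proved, stated in full; the proofs are below) =====
def Claim_equal_champernowneDigit : Prop := ∀ (n : Int), Dom_champernowneDigit n → Pre_champernowneDigit n → Spec_champernowneDigit n (champernowneDigit n)

-- ===== LEMMAS AND PROOFS =====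

-- digits of a natural number, and the Champernowne prefix "12345…" up to number m
def digN (n : Nat) : List Char := Nat.toDigits 10 n
def champC (m : Nat) : List Char := (List.range m).flatMap (fun k => digN (k + 1))

-- total number of digits of all the numbers 1 … 10^d - 1 (those of at most d digits)
def lenT : Nat → Nat
  | 0 => 0
  | d + 1 => lenT d + (d + 1) * 9 * 10 ^ d

-- --- Nat.toDigits plumbing ---

theorem pvCoreFuel : ∀ (n f₁ f₂ : Nat) (l : List Char), n < f₁ → n < f₂ →
    Nat.toDigitsCore 10 f₁ n l = Nat.toDigitsCore 10 f₂ n l := by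
  intro n
  induction n using Nat.strong_induction_on with
  | _ n ih =>
    intro f₁ f₂ l h1 h2
    match f₁, f₂ with
    | g₁ + 1, g₂ + 1 =>
      rw [pvCoreUnfold, pvCoreUnfold]
      split
      · rfl
      · rename_i hne
        have hlt : n / 10 < n := Nat.div_lt_self (by omega) (by omega)
        exact ih (n / 10) hlt g₁ g₂ _ (by omega) (by omega)

theorem digN_small (n : Nat) (h : n < 10) : digN n = [Nat.digitChar n] := by
  unfold digN Nat.toDigits
  rw [pvCoreUnfold, if_pos (Nat.div_eq_of_lt h), Nat.mod_eq_of_lt h]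

theorem digN_step (n : Nat) (h : 10 ≤ n) :
    digN n = digN (n / 10) ++ [Nat.digitChar (n % 10)] := by
  unfold digN Nat.toDigits
  rw [pvCoreUnfold, if_neg (by omega), pvCoreAppend,
    pvCoreFuel (n / 10) n (n / 10 + 1) [] (Nat.div_lt_self (by omega) (by omega)) (by omega)]

theorem digN_len : ∀ (d n : Nat), 10 ^ d ≤ n → n < 10 ^ (d + 1) → (digN n).length = d + 1 := by
  intro d
  induction d with
  | zero =>
    intro n h1 h2
    rw [digN_small n (by simpa using h2)]
    rfl
  | succ d ih =>
    intro n h1 h2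
    have h10 : 10 ≤ n := le_trans (by simpa using Nat.pow_le_pow_right (show 1 ≤ 10 by omega) (show 1 ≤ d + 1 by omega)) h1
    rw [digN_step n h10]
    have hd1 : 10 ^ d ≤ n / 10 := by
      rw [Nat.le_div_iff_mul_le (by omega)]
      calc 10 ^ d * 10 = 10 ^ (d + 1) := by ring
        _ ≤ n := h1
    have hd2 : n / 10 < 10 ^ (d + 1) := by
      rw [Nat.div_lt_iff_lt_mul (by omega)]
      calc n < 10 ^ (d + 1 + 1) := h2
        _ = 10 ^ (d + 1) * 10 := by ring
    simp [ih (n / 10) hd1 hd2]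

theorem digN_ne_nil (n : Nat) : digN n ≠ [] := by
  rcases Nat.lt_or_ge n 10 with h | h
  · rw [digN_small n h]; simp
  · rw [digN_step n h]; simp

theorem pvToCharsNat (m : Nat) : PySem.Int.toChars (m : Int) = digN m := by
  unfold PySem.Int.toChars
  rw [if_neg (by omega)]
  simp [digN]

-- --- the Champernowne prefix ---

theorem champC_add (a b : Nat) :
    champC (a + b) = champC a ++ (List.range b).flatMap (fun k => digN (a + k + 1)) := by
  unfold champC
  rw [List.range_add, List.flatMap_append, List.flatMap_map]

theorem champC_succ (m : Nat) : champC (m + 1) = champC m ++ digN (m + 1) := by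
  rw [champC_add m 1]
  simp

theorem champC_getElem?_stable (m m' k : Nat) (h : m ≤ m') (hk : k < (champC m).length) :
    (champC m')[k]? = (champC m)[k]? := by
  have hsplit : m' = m + (m' - m) := by omega
  rw [hsplit, champC_add]
  exact List.getElem?_append_left hk

theorem champC_len : ∀ d : Nat, (champC (10 ^ d - 1)).length = lenT d := by
  intro d
  induction d with
  | zero => simp [champC, lenT]
  | succ d ih =>
    have hsplit : 10 ^ (d + 1) - 1 = (10 ^ d - 1) + 9 * 10 ^ d := by
      have h1 : 1 ≤ 10 ^ d := Nat.one_le_pow _ _ (by omega)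
      have h2 : 10 ^ (d + 1) = 10 * 10 ^ d := by ring
      omega
    rw [hsplit, champC_add, List.length_append, ih]
    have hlen : ∀ k ∈ List.range (9 * 10 ^ d), (digN (10 ^ d - 1 + k + 1)).length = d + 1 := by
      intro k hk
      rw [List.mem_range] at hk
      have h1 : 1 ≤ 10 ^ d := Nat.one_le_pow _ _ (by omega)
      apply digN_len
      · omega
      · have h2 : 10 ^ (d + 1) = 10 * 10 ^ d := by ring
        omega
    have hblk : ((List.range (9 * 10 ^ d)).flatMap (fun k => digN (10 ^ d - 1 + k + 1))).length
        = 9 * 10 ^ d * (d + 1) := by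
      rw [List.length_flatMap, List.map_congr_left (fun k hk => hlen k hk)]
      simp [List.map_const', List.sum_replicate]
    rw [hblk]
    have hT : lenT (d + 1) = lenT d + (d + 1) * 9 * 10 ^ d := rfl
    rw [hT]
    ring

-- index into a flatMap of constant-length blocks
theorem pvFlatGet : ∀ (c : Nat) (g : Nat → List Char) (L : Nat), 0 < L →
    (∀ k, k < c → (g k).length = L) → ∀ p : Nat, p < c * L →
    ((List.range c).flatMap g)[p]? = (g (p / L))[p % L]? := by
  intro c
  induction c with
  | zero => intro g L hL hg p hp; omega
  | succ c ih =>
    intro g L hL hg p hp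
    rw [List.range_succ_eq_map, List.flatMap_cons, List.flatMap_map]
    have hcomp : (g ∘ Nat.succ) = fun k => g (k + 1) := rfl
    rcases Nat.lt_or_ge p L with h | h
    · rw [List.getElem?_append_left (by rw [hg 0 (by omega)]; exact h)]
      rw [Nat.div_eq_of_lt h, Nat.mod_eq_of_lt h]
    · rw [List.getElem?_append_right (by rw [hg 0 (by omega)]; exact h)]
      rw [hg 0 (by omega)]
      have hp' : p - L < c * L := by
        have hmul : p < L + c * L := by rw [Nat.succ_mul] at hp; omega
        omega
      obtain ⟨q, rfl⟩ : ∃ q, p = L + q := ⟨p - L, by omega⟩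
      have hrec := ih (fun k => g (k + 1)) L hL (fun k hk => hg (k + 1) (by omega)) q (by omega)
      rw [Nat.add_sub_cancel_left, Nat.add_mod_left, Nat.add_div_left _ hL]
      exact hrec

-- --- A's loop builds champC ---

theorem champLoop_champC (n : Int) : ∀ (j m : Nat), (n + 2 - ((champC m).length : Int)).toNat ≤ j →
    ∃ m', m ≤ m' ∧ champLoop n (champC m) ((m : Int) + 1) = champC m' ∧
      (n + 1 : Int) < (champC m').length := by
  intro j
  induction j with
  | zero =>
    intro m hm
    rw [champLoop, show ((m : Int) + 1) = (((m + 1 : Nat) : Int)) from by push_cast; ring,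
      pvToCharsNat (m + 1), ← champC_succ m]
    have h1 : (champC m).length ≤ (champC (m + 1)).length := by
      rw [champC_succ]; simp
    rw [if_pos (by omega)]
    exact ⟨m + 1, by omega, rfl, by omega⟩
  | succ j ih =>
    intro m hm
    rw [champLoop, show ((m : Int) + 1) = (((m + 1 : Nat) : Int)) from by push_cast; ring,
      pvToCharsNat (m + 1), ← champC_succ m]
    split
    · exact ⟨m + 1, by omega, rfl, by assumption⟩
    · rename_i hcond
      have hlen : (champC m).length < (champC (m + 1)).length := by
        rw [champC_succ, List.length_append]
        have hpos := List.length_pos_of_ne_nil (digN_ne_nil (m + 1))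
        omega
      obtain ⟨m', h1, h2, h3⟩ := ih (m + 1) (by omega)
      exact ⟨m', by omega, h2, h3⟩

-- --- B's loop: block arithmetic invariant ---

theorem lenT_succ (d : Nat) (hd : 1 ≤ d) : lenT d = lenT (d - 1) + d * 9 * 10 ^ (d - 1) := by
  obtain ⟨e, rfl⟩ : ∃ e, d = e + 1 := ⟨d - 1, by omega⟩
  simp [lenT]

theorem blockLoop_spec : ∀ (j : Nat) (pos : Int) (d : Nat), pos.toNat ≤ j → 0 ≤ pos → 1 ≤ d →
    ∃ (p e : Nat), d ≤ e ∧
      blockLoop pos (d : Int) ((9 * 10 ^ (d - 1) : Nat) : Int) = ((p : Int), (e : Int)) ∧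
      p < e * 9 * 10 ^ (e - 1) ∧ lenT (e - 1) + p = lenT (d - 1) + pos.toNat := by
  intro j
  induction j with
  | zero =>
    intro pos d hj hpos hd
    obtain ⟨d', rfl⟩ : ∃ d', d = d' + 1 := ⟨d - 1, by omega⟩
    have hpz : pos = 0 := by omega
    subst hpz
    have hN : (0:Nat) < (d' + 1) * (9 * 10 ^ d') := by positivity
    have hdc : ((d' + 1 : Nat) : Int) * ((9 * 10 ^ ((d' + 1) - 1) : Nat) : Int)
        = (((d' + 1) * (9 * 10 ^ d') : Nat) : Int) := by push_cast; ring
    rw [blockLoop, dif_neg (by rw [hdc]; rintro ⟨hle, -⟩; omega)]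
    refine ⟨0, d' + 1, le_refl _, by simp, ?_, by simp⟩
    simp only [Nat.add_sub_cancel, Nat.mul_assoc]
    exact hN
  | succ j ih =>
    intro pos d hj hpos hd
    obtain ⟨d', rfl⟩ : ∃ d', d = d' + 1 := ⟨d - 1, by omega⟩
    have hN : (0:Nat) < (d' + 1) * (9 * 10 ^ d') := by positivity
    have hdc : ((d' + 1 : Nat) : Int) * ((9 * 10 ^ ((d' + 1) - 1) : Nat) : Int)
        = (((d' + 1) * (9 * 10 ^ d') : Nat) : Int) := by push_cast; ring
    rw [blockLoop]
    by_cases hc : (((d' + 1) * (9 * 10 ^ d') : Nat) : Int) ≤ pos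
    · rw [dif_pos (by rw [hdc]; exact ⟨hc, by exact_mod_cast hN⟩)]
      rw [hdc, show ((d' + 1 : Nat) : Int) + 1 = ((d' + 2 : Nat) : Int) from by push_cast; ring,
        show ((9 * 10 ^ ((d' + 1) - 1) : Nat) : Int) * 10 = ((9 * 10 ^ ((d' + 2) - 1) : Nat) : Int) from by push_cast; ring]
      have hpos' : 0 ≤ pos - (((d' + 1) * (9 * 10 ^ d') : Nat) : Int) := by omega
      obtain ⟨p, e, h1, h2, h3, h4⟩ := ih (pos - (((d' + 1) * (9 * 10 ^ d') : Nat) : Int)) (d' + 2)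
        (by omega) hpos' (by omega)
      refine ⟨p, e, by omega, h2, h3, ?_⟩
      have hT : lenT ((d' + 2) - 1) = lenT ((d' + 1) - 1) + (d' + 1) * 9 * 10 ^ d' := by
        have := lenT_succ (d' + 1) (by omega)
        simpa using this
      have hmul : (d' + 1) * 9 * 10 ^ d' = (d' + 1) * (9 * 10 ^ d') := by ring
      rw [hT, hmul] at h4
      omega
    · rw [dif_neg (by rw [hdc]; rintro ⟨hle, -⟩; exact hc hle)]
      refine ⟨pos.toNat, d' + 1, le_refl _, by simp [Int.toNat_of_nonneg hpos], ?_, rfl⟩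
      have hlt : pos.toNat < (d' + 1) * (9 * 10 ^ d') := by omega
      calc pos.toNat < (d' + 1) * (9 * 10 ^ d') := hlt
        _ = (d' + 1) * 9 * 10 ^ ((d' + 1) - 1) := by
          simp only [Nat.add_sub_cancel]
          ring

-- character of the Champernowne string at a position inside the e-digit block
theorem champC_block_get (e p : Nat) (he : 1 ≤ e) (hp : p < e * 9 * 10 ^ (e - 1)) :
    (champC (10 ^ e - 1))[lenT (e - 1) + p]? = (digN (10 ^ (e - 1) + p / e))[p % e]? := by
  have h1 : 1 ≤ 10 ^ (e - 1) := Nat.one_le_pow _ _ (by omega)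
  have hsplit : 10 ^ e - 1 = (10 ^ (e - 1) - 1) + 9 * 10 ^ (e - 1) := by
    have h2 : 10 ^ e = 10 * 10 ^ (e - 1) := by
      conv_lhs => rw [show e = (e - 1) + 1 by omega]
      ring
    omega
  rw [hsplit, champC_add]
  rw [List.getElem?_append_right (by rw [champC_len]; omega)]
  rw [champC_len, Nat.add_sub_cancel_left]
  have hlen : ∀ k, k < 9 * 10 ^ (e - 1) → (digN (10 ^ (e - 1) - 1 + k + 1)).length = e := by
    intro k hk
    have hres := digN_len (e - 1) (10 ^ (e - 1) - 1 + k + 1) (by omega)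
      (by
        have h3 : 10 ^ ((e - 1) + 1) = 10 * 10 ^ (e - 1) := by ring
        omega)
    omega
  rw [pvFlatGet (9 * 10 ^ (e - 1)) _ e (by omega) hlen p (by
    calc p < e * 9 * 10 ^ (e - 1) := hp
      _ = 9 * 10 ^ (e - 1) * e := by ring)]
  congr 2
  omega

-- ===== VERDICT (by name: the statement is the Claim_ definition above) =====
theorem champernowneDigit_spec : Claim_equal_champernowneDigit := by
  intro n _ hpre
  have hn : 1 ≤ n := hpre
  unfold Spec_champernowneDigit champernowneDigit champernowneDigit_alt
  -- B's loop
  obtain ⟨p, e, he1, he2, he3, he4⟩ := blockLoop_spec (n - 1).toNat (n - 1) 1 (le_refl _) (by omega) (le_refl 1)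
  have he2' : blockLoop (n - 1) 1 9 = ((p : Int), (e : Int)) := by
    have hc1 : ((1 : Nat) : Int) = 1 := by norm_num
    have hc9 : ((9 * 10 ^ (1 - 1) : Nat) : Int) = 9 := by norm_num
    rw [hc1, hc9] at he2
    exact he2
  have hk : (n - 1).toNat = lenT (e - 1) + p := by simpa [lenT] using he4.symm
  -- A's loop
  obtain ⟨m', hm1, hm2, hm3⟩ := champLoop_champC n ((n + 2 - ((champC 0).length : Int)).toNat) 0 (le_refl _)
  have hA : champLoop n [] 1 = champC m' := by
    have h0 : champC 0 = [] := rfl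
    rw [← h0]
    simp only [Nat.cast_zero, zero_add] at hm2
    exact hm2
  -- the number and offset B computes
  have hpe : p / e < 9 * 10 ^ (e - 1) := by
    rw [Nat.div_lt_iff_lt_mul (by omega)]
    calc p < e * 9 * 10 ^ (e - 1) := he3
      _ = 9 * 10 ^ (e - 1) * e := by ring
  have h1e : 1 ≤ 10 ^ (e - 1) := Nat.one_le_pow _ _ (by omega)
  have hnum1 : 10 ^ (e - 1) ≤ 10 ^ (e - 1) + p / e := Nat.le_add_right _ _
  have hnum2 : 10 ^ (e - 1) + p / e < 10 ^ ((e - 1) + 1) := by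
    calc 10 ^ (e - 1) + p / e < 10 ^ (e - 1) + 9 * 10 ^ (e - 1) := Nat.add_lt_add_left hpe _
      _ = 10 ^ ((e - 1) + 1) := by ring
  have hdlen : (digN (10 ^ (e - 1) + p / e)).length = e := by
    have := digN_len (e - 1) _ hnum1 hnum2
    omega
  -- both sides fetch the same character
  have hmain : (champC m')[(n - 1).toNat]? = (digN (10 ^ (e - 1) + p / e))[p % e]? := by
    have hklt : (n - 1).toNat < (champC (10 ^ e - 1)).length := by
      rw [champC_len, hk, lenT_succ e he1]
      exact Nat.add_lt_add_left he3 _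
    have hklt' : (n - 1).toNat < (champC m').length := by omega
    have hs1 := champC_getElem?_stable m' (max m' (10 ^ e - 1)) (n - 1).toNat (le_max_left _ _) hklt'
    have hs2 := champC_getElem?_stable (10 ^ e - 1) (max m' (10 ^ e - 1)) (n - 1).toNat (le_max_right _ _) hklt
    rw [← hs1, hs2, hk]
    exact champC_block_get e p he1 he3
  -- assemble
  show (match PySem.List.pyGet? (champLoop n [] 1) (n - 1) with
        | some c => (PySem.Int.ofChars? [c]).getD 0
        | none => 0)
      = (match PySem.List.pyGet? (PySem.Int.toChars (10 ^ ((blockLoop (n - 1) 1 9).2 - 1).toNat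
            + PySem.Int.floordiv (blockLoop (n - 1) 1 9).1 (blockLoop (n - 1) 1 9).2))
          (PySem.Int.mod (blockLoop (n - 1) 1 9).1 (blockLoop (n - 1) 1 9).2) with
        | some c => (PySem.Int.ofChars? [c]).getD 0
        | none => 0)
  rw [hA, he2']
  dsimp only
  have hidx : n - 1 = (((n - 1).toNat : Nat) : Int) := by omega
  rw [hidx, PySem.List.pyGet?_natCast, hmain]
  have hmod : PySem.Int.mod (p : Int) (e : Int) = ((p % e : Nat) : Int) := PySem.Int.mod_natCast p e
  have hdiv : PySem.Int.floordiv (p : Int) (e : Int) = ((p / e : Nat) : Int) := PySem.Int.floordiv_natCast p e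
  have hexp : (((e : Int)) - 1).toNat = e - 1 := by omega
  rw [hexp, hdiv, hmod,
    show (10 : Int) ^ (e - 1) + ((p / e : Nat) : Int) = ((10 ^ (e - 1) + p / e : Nat) : Int) from by push_cast; ring,
    pvToCharsNat, PySem.List.pyGet?_natCast]
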